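-- pv_equiv track=rewrite | github.com/Susurrus0/LeetCode-Problems | Biweekly Contest 174/main.py | bestTower
-- ===== SOURCE A (Python) =====
-- def bestTower(towers: list[list[int]], center: list[int], radius: int) -> list[int]:
--     """Q1 function"""
--     # PASSED
--     def manhattanDistance(center: list[int], tower: list[int]):
--         # The Manhattan Distance between two cells (xi, yi) and (xj, yj) is |xi - xj| + |yi - yj|
--         return abs(center[0] - tower[0]) + abs(center[1] - tower[1])
--
--     goodTowers: list[list[int]] = []
--
--     for tower in towers:
--         distFromCenter: int = manhattanDistance(center, tower)
--         if distFromCenter <= radius: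
--             goodTowers.append(tower)
--
--     if len(goodTowers) < 1:
--         return [-1, -1]
--
--     bestTower: list[int] = [-1, -1, -1]
--
--     for goodTower in goodTowers:
--         if goodTower[2] > bestTower[2]:
--             bestTower = goodTower
--         elif goodTower[2] == bestTower[2] and goodTower[:2] < bestTower[:2]:
--             bestTower = goodTower
--
--     return bestTower[:2]
-- ===== SOURCE B (Python) =====
-- def bestTower(towers: list[list[int]], center: list[int], radius: int) -> list[int]:
--     best = {-1: [-1, -1]}
--     for t in towers:
--         if abs(center[0] - t[0]) + abs(center[1] - t[1]) <= radius:
--             q, xy = t[2], t[:2]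
--             if q not in best or xy < best[q]:
--                 best[q] = xy
--     return best[max(best)]
-- ===== Notes on version B (the rewrite author's own statement) =====
-- stated objective: alternative
-- what changed: Replaces A's filter-into-a-list plus best-so-far scan (with an empty guard and a sentinel comparison) by a single pass that buckets towers by quality in a dict seeded {-1: [-1,-1]}, keeping the lexicographically smallest coordinate pair per quality, and finally returns the entry at the maximal quality key.
import Mathlib
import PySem

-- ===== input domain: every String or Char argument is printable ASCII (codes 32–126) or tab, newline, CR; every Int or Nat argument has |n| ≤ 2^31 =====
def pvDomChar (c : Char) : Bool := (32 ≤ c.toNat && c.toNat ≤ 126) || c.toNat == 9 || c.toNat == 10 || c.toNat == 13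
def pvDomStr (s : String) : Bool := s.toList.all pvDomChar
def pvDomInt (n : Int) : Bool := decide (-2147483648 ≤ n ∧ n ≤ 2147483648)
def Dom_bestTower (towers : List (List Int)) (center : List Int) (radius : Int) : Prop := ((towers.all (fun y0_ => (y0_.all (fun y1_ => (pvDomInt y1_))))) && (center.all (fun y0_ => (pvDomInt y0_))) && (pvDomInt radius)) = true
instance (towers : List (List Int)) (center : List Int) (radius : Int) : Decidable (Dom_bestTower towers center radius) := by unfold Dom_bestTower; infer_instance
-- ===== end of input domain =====

-- B buckets towers by quality in a dict (per-quality lexicographic minimum of the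
-- coordinates, seeded with {-1: [-1,-1]}) and returns the entry at the maximal quality
-- key, replacing A's filter-then-scan with sentinel and empty guard (objective: alternative).

-- ===== PORT A =====
-- manhattanDistance helper; pyGetD is total indexing: Pre_ keeps every index in range
def pvManhattan (center tower : List Int) : Int :=
  |PySem.List.pyGetD center 0 0 - PySem.List.pyGetD tower 0 0| +
  |PySem.List.pyGetD center 1 0 - PySem.List.pyGetD tower 1 0|

def bestTower (towers : List (List Int)) (center : List Int) (radius : Int) : List Int :=
  let goodTowers : List (List Int) :=
    towers.foldl (fun acc tower =>
      if pvManhattan center tower ≤ radius then acc ++ [tower] else acc) []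
  if goodTowers.length < 1 then [-1, -1]
  else
    let best : List Int :=
      goodTowers.foldl (fun best g =>
        if PySem.List.pyGetD g 2 0 > PySem.List.pyGetD best 2 0 then g
        else if PySem.List.pyGetD g 2 0 = PySem.List.pyGetD best 2 0 ∧
                PySem.List.slice g none (some 2) < PySem.List.slice best none (some 2) then g
        else best) [-1, -1, -1]
    PySem.List.slice best none (some 2)

-- ===== PORT B =====
-- q = t[2] and xy = t[:2] of B's loop body
def pvQ (t : List Int) : Int := PySem.List.pyGetD t 2 0
def pvXY (t : List Int) : List Int := PySem.List.slice t none (some 2)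

-- B's loop body: 'if q not in best or xy < best[q]: best[q] = xy' (guarded by the radius test)
def pvBStep (center : List Int) (radius : Int)
    (d : PySem.Dict Int (List Int)) (t : List Int) : PySem.Dict Int (List Int) :=
  if pvManhattan center t ≤ radius then
    if !(d.contains (pvQ t)) || decide (pvXY t < d.getD (pvQ t) []) then
      d.insert (pvQ t) (pvXY t)
    else d
  else d

def bestTower_alt (towers : List (List Int)) (center : List Int) (radius : Int) : List Int :=
  let best : PySem.Dict Int (List Int) :=
    towers.foldl (pvBStep center radius) (PySem.Dict.empty.insert (-1) [-1, -1])
  match PySem.List.max? best.keys (fun k => k) with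
  | some q => best.getD q []    -- 'best[max(best)]': the max key is always present
  | none => []                  -- unreachable: best is seeded, its keys are nonempty

-- ===== PRECONDITION & SPEC =====
-- Pre_ excludes exactly the inputs on which A raises IndexError: a center shorter than 2
-- while towers is nonempty, a tower shorter than 2, or a tower within the radius shorter than 3.
def Pre_bestTower (towers : List (List Int)) (center : List Int) (radius : Int) : Prop :=
  (towers ≠ [] → 2 ≤ center.length) ∧
  ∀ t ∈ towers, 2 ≤ t.length ∧
    (|center.getD 0 0 - t.getD 0 0| + |center.getD 1 0 - t.getD 1 0| ≤ radius → 3 ≤ t.length)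
instance (towers : List (List Int)) (center : List Int) (radius : Int) : Decidable (Pre_bestTower towers center radius) := by unfold Pre_bestTower; infer_instance

def pvWitness_bestTower : List (List Int) × List Int × Int := ([[1, 2, 5], [0, 0, 9]], [0, 1], 3)

def Spec_bestTower (towers : List (List Int)) (center : List Int) (radius : Int) (out : List Int) : Prop := out = bestTower_alt towers center radius
instance (towers : List (List Int)) (center : List Int) (radius : Int) (out : List Int) : Decidable (Spec_bestTower towers center radius out) := by unfold Spec_bestTower; infer_instance

-- ===== CLAIM (what is proved, stated in full; the proofs are below) =====
def Claim_equal_bestTower : Prop := ∀ (towers : List (List Int)) (center : List Int) (radius : Int), Dom_bestTower towers center radius → Pre_bestTower towers center radius → Spec_bestTower towers center radius (bestTower towers center radius)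

-- ===== LEMMAS AND PROOFS =====

-- A's scan step over the candidate list (best-so-far under (quality desc, coords asc))
def pvStep (b g : List Int) : List Int :=
  if pvQ g > pvQ b then g
  else if pvQ g = pvQ b ∧ pvXY g < pvXY b then g
  else b

-- B's loop body after the radius guard has been discharged
def pvBInner (d : PySem.Dict Int (List Int)) (t : List Int) : PySem.Dict Int (List Int) :=
  if !(d.contains (pvQ t)) || decide (pvXY t < d.getD (pvQ t) []) then
    d.insert (pvQ t) (pvXY t)
  else d

lemma pvBStep_filter (center : List Int) (radius : Int) (towers : List (List Int))
    (d : PySem.Dict Int (List Int)) :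
    towers.foldl (pvBStep center radius) d
      = (towers.filter (fun t => decide (pvManhattan center t ≤ radius))).foldl pvBInner d := by
  induction towers generalizing d with
  | nil => rfl
  | cons t ts ih =>
      by_cases h : pvManhattan center t ≤ radius <;>
        simp [pvBStep, pvBInner, h, ih]

-- the dict ↔ scan invariant: the scan's best-so-far m has the maximal key of d,
-- and d's entry there is m's coordinate pair
def pvInv (d : PySem.Dict Int (List Int)) (m : List Int) : Prop :=
  d.getD (pvQ m) [] = pvXY m ∧ pvQ m ∈ d.keys ∧ ∀ k ∈ d.keys, k ≤ pvQ m

lemma pvInv_step (d : PySem.Dict Int (List Int)) (m t : List Int) (h : pvInv d m) :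
    pvInv (pvBInner d t) (pvStep m t) := by
  obtain ⟨h1, h2, h3⟩ := h
  unfold pvBInner pvStep
  rcases lt_trichotomy (pvQ m) (pvQ t) with hq | hq | hq
  · -- strictly better quality: fresh key, insert, scan takes t
    have hnc : d.contains (pvQ t) = false := by
      rcases hc : d.contains (pvQ t) with _ | _
      · rfl
      · exact absurd (h3 _ ((PySem.Dict.contains_iff_mem_keys _ _).mp hc)) (by omega)
    rw [if_pos (show (!(d.contains (pvQ t)) || decide (pvXY t < d.getD (pvQ t) [])) = true by simp [hnc]), if_pos hq]
    refine ⟨PySem.Dict.getD_insert_self _ _ _ _,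
      (PySem.Dict.mem_keys_insert _ _ _ _).mpr (Or.inl rfl), ?_⟩
    intro k hk
    rcases (PySem.Dict.mem_keys_insert _ _ _ _).mp hk with rfl | hk
    · exact le_refl _
    · exact le_trans (h3 k hk) (le_of_lt hq)
  · -- same quality: key present with value pvXY m; insert iff xy < it
    have hcont' : d.contains (pvQ t) = true :=
      (PySem.Dict.contains_iff_mem_keys _ _).mpr (hq ▸ h2)
    have hval : d.getD (pvQ t) [] = pvXY m := hq ▸ h1
    rw [if_neg (show ¬ pvQ t > pvQ m by omega)]
    by_cases hxy : pvXY t < pvXY m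
    · rw [if_pos (show (!(d.contains (pvQ t)) || decide (pvXY t < d.getD (pvQ t) [])) = true by simp [hcont', hval, hxy]), if_pos ⟨hq.symm, hxy⟩]
      refine ⟨PySem.Dict.getD_insert_self _ _ _ _,
        (PySem.Dict.mem_keys_insert _ _ _ _).mpr (Or.inl rfl), ?_⟩
      intro k hk
      rcases (PySem.Dict.mem_keys_insert _ _ _ _).mp hk with rfl | hk
      · exact le_refl _
      · exact le_of_le_of_eq (h3 k hk) hq
    · rw [if_neg (show ¬ (!(d.contains (pvQ t)) || decide (pvXY t < d.getD (pvQ t) [])) = true by simp [hcont', hval, hxy]), if_neg (show ¬ (pvQ t = pvQ m ∧ pvXY t < pvXY m) from fun hcon => hxy hcon.2)]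
      exact ⟨h1, h2, h3⟩
  · -- worse quality: scan keeps m; a possible insert at pvQ t ≠ pvQ m is invisible at pvQ m
    rw [if_neg (show ¬ pvQ t > pvQ m by omega),
        if_neg (show ¬ (pvQ t = pvQ m ∧ pvXY t < pvXY m) from fun hcon => absurd hcon.1 (by omega))]
    by_cases hins : (!(d.contains (pvQ t)) || decide (pvXY t < d.getD (pvQ t) [])) = true
    · rw [if_pos hins]
      refine ⟨?_, (PySem.Dict.mem_keys_insert _ _ _ _).mpr (Or.inr h2), ?_⟩
      · rw [PySem.Dict.getD_insert, if_neg (show pvQ m ≠ pvQ t by omega)]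
        exact h1
      · intro k hk
        rcases (PySem.Dict.mem_keys_insert _ _ _ _).mp hk with rfl | hk
        · exact le_of_lt hq
        · exact h3 k hk
    · rw [if_neg hins]
      exact ⟨h1, h2, h3⟩

lemma pvInv_fold (cand : List (List Int)) (d : PySem.Dict Int (List Int)) (m : List Int)
    (h : pvInv d m) : pvInv (cand.foldl pvBInner d) (cand.foldl pvStep m) := by
  induction cand generalizing d m with
  | nil => exact h
  | cons t ts ih => exact ih _ _ (pvInv_step d m t h)

-- extraction: under the invariant, 'best[max(best)]' is the scan result's coordinate pair
lemma pvInv_extract (d : PySem.Dict Int (List Int)) (m : List Int) (h : pvInv d m) :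
    (match PySem.List.max? d.keys (fun k => k) with
     | some q => d.getD q []
     | none => []) = pvXY m := by
  obtain ⟨h1, h2, h3⟩ := h
  rcases hmax : PySem.List.max? d.keys (fun k => k) with _ | q
  · exact absurd ((PySem.List.max?_eq_none_iff _ _).mp hmax)
      (fun hnil => by simp [hnil] at h2)
  · have hq : q = pvQ m :=
      le_antisymm (h3 q (PySem.List.max?_mem hmax)) (PySem.List.max?_isMax hmax _ h2)
    simpa [hq] using h1

-- ===== VERDICT (by name: the statement is the Claim_ definition above) =====
theorem bestTower_spec : Claim_equal_bestTower := by
  intro towers center radius _ _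
  unfold Spec_bestTower bestTower bestTower_alt
  rw [PySem.List.foldl_append_ite_eq_filter, pvBStep_filter]
  simp only [List.nil_append]
  have hinv0 : pvInv (PySem.Dict.empty.insert (-1) [-1, -1]) [-1, -1, -1] := by
    unfold pvInv pvQ pvXY
    decide
  have hB := pvInv_extract _ _
    (pvInv_fold (towers.filter (fun t => decide (pvManhattan center t ≤ radius))) _ _ hinv0)
  rcases hfil : towers.filter (fun t => decide (pvManhattan center t ≤ radius)) with _ | ⟨x, g⟩
  · -- no candidate: A returns [-1,-1]; B's dict is still the seed
    rw [hfil] at hB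
    simp only [List.foldl_nil] at hB
    simpa [pvXY] using hB.symm
  · rw [hfil] at hB
    have hlen : ¬ (x :: g).length < 1 := by simp
    rw [if_neg hlen]
    have hA : (x :: g).foldl (fun best g =>
        if PySem.List.pyGetD g 2 0 > PySem.List.pyGetD best 2 0 then g
        else if PySem.List.pyGetD g 2 0 = PySem.List.pyGetD best 2 0 ∧
                PySem.List.slice g none (some 2) < PySem.List.slice best none (some 2) then g
        else best) [-1, -1, -1] = (x :: g).foldl pvStep [-1, -1, -1] := rfl
    rw [hA]
    exact hB.symm
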